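-- pv_equiv track=rewrite | github.com/kanoes/Umaai | backend/site_data.py | build_best_aptitudes
-- ===== SOURCE A (Python) =====
-- from typing import Any
--
-- DISTANCE_FIELDS = [
--     ("short", "短距离", "aptitudeShort"),
--     ("mile", "英里", "aptitudeMile"),
--     ("middle", "中距离", "aptitudeMiddle"),
--     ("long", "长距离", "aptitudeLong"),
-- ]
--
-- STYLE_FIELDS = [
--     ("runner", "逃", "aptitudeRunner"),
--     ("leader", "先", "aptitudeLeader"),
--     ("betweener", "差", "aptitudeBetweener"),
--     ("chaser", "追", "aptitudeChaser"),
-- ]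
--
-- APTITUDE_LABELS = {
--     1: "G",
--     2: "F",
--     3: "E",
--     4: "D",
--     5: "C",
--     6: "B",
--     7: "A",
--     8: "S",
-- }
--
-- def grade_score(value: Any) -> int:
--     if isinstance(value, int):
--         return value
--     return 0
--
-- def aptitude_grade(value: Any) -> str | None:
--     if isinstance(value, int):
--         return APTITUDE_LABELS.get(value, str(value))
--     return None
--
-- def build_best_aptitudes(character_cards_raw: Any) -> tuple[dict[str, str | None], dict[str, str | None], list[str], list[str]]:
--     distance_scores = {key: 0 for key, _, _ in DISTANCE_FIELDS}
--     style_scores = {key: 0 for key, _, _ in STYLE_FIELDS}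
--
--     if isinstance(character_cards_raw, list):
--         for item in character_cards_raw:
--             if not isinstance(item, dict):
--                 continue
--             for key, _label, field in DISTANCE_FIELDS:
--                 distance_scores[key] = max(distance_scores[key], grade_score(item.get(field)))
--             for key, _label, field in STYLE_FIELDS:
--                 style_scores[key] = max(style_scores[key], grade_score(item.get(field)))
--
--     distance_profile = {key: aptitude_grade(score) for key, score in distance_scores.items()}
--     style_profile = {key: aptitude_grade(score) for key, score in style_scores.items()}
--     distance_tags = [key for key, score in distance_scores.items() if score >= 6]
--     style_tags = [key for key, score in style_scores.items() if score >= 6]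
--     return distance_profile, style_profile, distance_tags, style_tags
-- ===== SOURCE B (Python) =====
-- from typing import Any
--
-- DISTANCE_FIELDS = [
--     ("short", "短距离", "aptitudeShort"),
--     ("mile", "英里", "aptitudeMile"),
--     ("middle", "中距离", "aptitudeMiddle"),
--     ("long", "长距离", "aptitudeLong"),
-- ]
--
-- STYLE_FIELDS = [
--     ("runner", "逃", "aptitudeRunner"),
--     ("leader", "先", "aptitudeLeader"),
--     ("betweener", "差", "aptitudeBetweener"),
--     ("chaser", "追", "aptitudeChaser"),
-- ]
--
-- APTITUDE_LABELS = {
--     1: "G", 2: "F", 3: "E", 4: "D", 5: "C", 6: "B", 7: "A", 8: "S",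
-- }
--
-- def grade_score(value: Any) -> int:
--     if isinstance(value, int):
--         return value
--     return 0
--
-- def aptitude_grade(value: Any) -> str | None:
--     if isinstance(value, int):
--         return APTITUDE_LABELS.get(value, str(value))
--     return None
--
-- def build_best_aptitudes(character_cards_raw: Any):
--     cards = ([it for it in character_cards_raw if isinstance(it, dict)]
--              if isinstance(character_cards_raw, list) else [])
--
--     def best(field: str) -> int:
--         return max([grade_score(it.get(field)) for it in cards] + [0])
--
--     distance_scores = {key: best(field) for key, _, field in DISTANCE_FIELDS}
--     style_scores = {key: best(field) for key, _, field in STYLE_FIELDS}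
--
--     distance_profile = {k: aptitude_grade(s) for k, s in distance_scores.items()}
--     style_profile = {k: aptitude_grade(s) for k, s in style_scores.items()}
--     distance_tags = [k for k, s in distance_scores.items() if s >= 6]
--     style_tags = [k for k, s in style_scores.items() if s >= 6]
--     return distance_profile, style_profile, distance_tags, style_tags
-- ===== Notes on version B (the rewrite author's own statement) =====
-- stated objective: alternative
-- what changed: Replaced A's single pass that incrementally mutates two score dicts card by card with a field-outer decomposition: for each of the eight aptitude fields, the best score is one max over the card list (max of the per-card grade scores plus a trailing 0 so empty input and all-negative scores still floor at 0); profiles and tags are then derived per field.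
import Mathlib
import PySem

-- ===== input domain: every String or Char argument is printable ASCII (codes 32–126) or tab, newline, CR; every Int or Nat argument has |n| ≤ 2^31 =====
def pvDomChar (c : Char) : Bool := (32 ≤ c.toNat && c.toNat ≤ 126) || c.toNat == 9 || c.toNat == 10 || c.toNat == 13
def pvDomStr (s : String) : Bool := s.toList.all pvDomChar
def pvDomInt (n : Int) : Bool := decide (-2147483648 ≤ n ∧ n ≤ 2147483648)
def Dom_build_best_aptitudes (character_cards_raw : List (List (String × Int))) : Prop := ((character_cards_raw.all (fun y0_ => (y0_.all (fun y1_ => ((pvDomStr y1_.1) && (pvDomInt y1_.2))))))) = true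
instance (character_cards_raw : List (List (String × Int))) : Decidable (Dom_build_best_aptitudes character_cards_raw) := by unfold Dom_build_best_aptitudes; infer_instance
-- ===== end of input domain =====

-- B replaces A's single pass that mutates two score dicts card by card with a field-outer
-- decomposition: one max computation per aptitude field over the card list (objective:
-- alternative decomposition, same asymptotic cost).

-- ===== PORT A =====
def pvDistanceFields : List (String × String × String) :=
  [("short", "短距离", "aptitudeShort"), ("mile", "英里", "aptitudeMile"),
   ("middle", "中距离", "aptitudeMiddle"), ("long", "长距离", "aptitudeLong")]

def pvStyleFields : List (String × String × String) :=
  [("runner", "逃", "aptitudeRunner"), ("leader", "先", "aptitudeLeader"),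
   ("betweener", "差", "aptitudeBetweener"), ("chaser", "追", "aptitudeChaser")]

def pvAptitudeLabels : PySem.Dict Int String :=
  PySem.Dict.mk [(1, "G"), (2, "F"), (3, "E"), (4, "D"), (5, "C"), (6, "B"), (7, "A"), (8, "S")]

-- grade_score(v): under the type convention item.get(field) is an Option Int; None → 0
def pvGradeScore (v : Option Int) : Int := match v with | some n => n | none => 0

-- aptitude_grade(v): v is always an int here, so the result is always `some`
def pvAptitudeGrade (v : Int) : Option String :=
  some ((pvAptitudeLabels.get? v).getD (PySem.Int.toStr v))

def build_best_aptitudes (character_cards_raw : List (List (String × Int))) : (List (String × Option String)) × (List (String × Option String)) × List String × List String :=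
  -- {key: 0 for key, _, _ in FIELDS}
  let distance_scores : PySem.Dict String Int :=
    pvDistanceFields.foldl (fun d t => d.insert t.1 0) (PySem.Dict.mk [])
  let style_scores : PySem.Dict String Int :=
    pvStyleFields.foldl (fun d t => d.insert t.1 0) (PySem.Dict.mk [])
  -- the for-loop over the cards (both isinstance checks are identically true under the type
  -- convention); scores[key] is read with getD 0, exact since every key was initialised above
  let final := character_cards_raw.foldl
    (fun (st : PySem.Dict String Int × PySem.Dict String Int) item =>
      (pvDistanceFields.foldl
        (fun dd t => dd.insert t.1 (max (dd.getD t.1 0) (pvGradeScore ((PySem.Dict.mk item).get? t.2.2)))) st.1,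
       pvStyleFields.foldl
        (fun ss t => ss.insert t.1 (max (ss.getD t.1 0) (pvGradeScore ((PySem.Dict.mk item).get? t.2.2)))) st.2))
    (distance_scores, style_scores)
  -- dict/list comprehensions over .items(): keys are distinct, so the result dict is the mapped items list
  let distance_profile := final.1.items.map (fun ks => (ks.1, pvAptitudeGrade ks.2))
  let style_profile := final.2.items.map (fun ks => (ks.1, pvAptitudeGrade ks.2))
  let distance_tags := (final.1.items.filter (fun ks => decide (6 ≤ ks.2))).map (fun ks => ks.1)
  let style_tags := (final.2.items.filter (fun ks => decide (6 ≤ ks.2))).map (fun ks => ks.1)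
  (distance_profile, style_profile, distance_tags, style_tags)

-- ===== PORT B =====
-- best(field) = max([grade_score(it.get(field)) for it in cards] + [0])
def pvBest (cards : List (List (String × Int))) (field : String) : Int :=
  match PySem.List.max? ((cards.map (fun it => pvGradeScore ((PySem.Dict.mk it).get? field))) ++ [0]) (fun x => x) with
  | some m => m
  | none => 0   -- unreachable: the list always contains the trailing 0

def build_best_aptitudes_alt (character_cards_raw : List (List (String × Int))) : (List (String × Option String)) × (List (String × Option String)) × List String × List String :=
  -- cards = [it for it in raw if isinstance(it, dict)]: every item is a dict under the type convention
  let cards := character_cards_raw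
  let distance_scores := pvDistanceFields.map (fun t => (t.1, pvBest cards t.2.2))
  let style_scores := pvStyleFields.map (fun t => (t.1, pvBest cards t.2.2))
  let distance_profile := distance_scores.map (fun ks => (ks.1, pvAptitudeGrade ks.2))
  let style_profile := style_scores.map (fun ks => (ks.1, pvAptitudeGrade ks.2))
  let distance_tags := (distance_scores.filter (fun ks => decide (6 ≤ ks.2))).map (fun ks => ks.1)
  let style_tags := (style_scores.filter (fun ks => decide (6 ≤ ks.2))).map (fun ks => ks.1)
  (distance_profile, style_profile, distance_tags, style_tags)

-- ===== PRECONDITION & SPEC =====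
def Spec_build_best_aptitudes (character_cards_raw : List (List (String × Int))) (out : (List (String × Option String)) × (List (String × Option String)) × List String × List String) : Prop := out = build_best_aptitudes_alt character_cards_raw
instance (character_cards_raw : List (List (String × Int))) (out : (List (String × Option String)) × (List (String × Option String)) × List String × List String) : Decidable (Spec_build_best_aptitudes character_cards_raw out) := by unfold Spec_build_best_aptitudes; infer_instance

-- ===== CLAIM (what is proved, stated in full; the proofs are below) =====
def Claim_equal_build_best_aptitudes : Prop := ∀ (character_cards_raw : List (List (String × Int))), Dom_build_best_aptitudes character_cards_raw → Spec_build_best_aptitudes character_cards_raw (build_best_aptitudes character_cards_raw)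

-- ===== LEMMAS AND PROOFS =====

-- the per-field contribution of one card
def pvG (item : List (String × Int)) (f : String) : Int :=
  pvGradeScore ((PySem.Dict.mk item).get? f)

theorem pv_foldl_max_comm (l : List Int) (a : Int) : ∀ b : Int,
    l.foldl max (max a b) = max a (l.foldl max b) := by
  induction l with
  | nil => intro b; rfl
  | cons x l ih =>
      intro b
      simp only [List.foldl_cons, max_assoc]
      exact ih (max b x)

theorem pv_max_cons (x : Int) (l : List Int) :
    PySem.List.max? (x :: l) (fun y => y) = some (l.foldl max x) := by
  induction l generalizing x with
  | nil => rfl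
  | cons y l ih =>
      have h1 : PySem.List.max? (x :: y :: l) (fun z => z)
          = PySem.List.max? (max x y :: l) (fun z => z) := by
        by_cases h : x < y
        · simp [PySem.List.max?, h, max_eq_right h.le]
        · simp [PySem.List.max?, h, max_eq_left (le_of_not_gt h)]
      rw [h1, ih]
      simp

theorem pv_max_append_zero (l : List Int) :
    PySem.List.max? (l ++ [(0:Int)]) (fun x => x) = some (l.foldl max 0) := by
  cases l with
  | nil => rfl
  | cons x l =>
      rw [show (x :: l) ++ [(0:Int)] = x :: (l ++ [0]) from rfl, pv_max_cons, List.foldl_append]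
      simp only [List.foldl_cons, List.foldl_nil]
      rw [pv_foldl_max_comm l 0 x, max_comm]

theorem pv_best_eq (cards : List (List (String × Int))) (f : String) :
    pvBest cards f = cards.foldl (fun x it => max x (pvG it f)) 0 := by
  unfold pvBest
  rw [pv_max_append_zero]
  simp [List.foldl_map, pvG]

theorem pv_stepD (item : List (String × Int)) (a b c d : Int) :
    pvDistanceFields.foldl
      (fun dd t => dd.insert t.1 (max (dd.getD t.1 0) (pvGradeScore ((PySem.Dict.mk item).get? t.2.2))))
      (PySem.Dict.mk [("short", a), ("mile", b), ("middle", c), ("long", d)])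
    = PySem.Dict.mk [("short", max a (pvG item "aptitudeShort")), ("mile", max b (pvG item "aptitudeMile")),
        ("middle", max c (pvG item "aptitudeMiddle")), ("long", max d (pvG item "aptitudeLong"))] := by
  simp [pvDistanceFields, PySem.Dict.insert, PySem.Dict.getD, PySem.Dict.get?,
    PySem.Dict.contains, pvG]

theorem pv_stepS (item : List (String × Int)) (e f g h : Int) :
    pvStyleFields.foldl
      (fun ss t => ss.insert t.1 (max (ss.getD t.1 0) (pvGradeScore ((PySem.Dict.mk item).get? t.2.2))))
      (PySem.Dict.mk [("runner", e), ("leader", f), ("betweener", g), ("chaser", h)])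
    = PySem.Dict.mk [("runner", max e (pvG item "aptitudeRunner")), ("leader", max f (pvG item "aptitudeLeader")),
        ("betweener", max g (pvG item "aptitudeBetweener")), ("chaser", max h (pvG item "aptitudeChaser"))] := by
  simp [pvStyleFields, PySem.Dict.insert, PySem.Dict.getD, PySem.Dict.get?,
    PySem.Dict.contains, pvG]

theorem pv_foldA (l : List (List (String × Int))) :
    ∀ a b c d e f g h : Int,
    l.foldl
      (fun (st : PySem.Dict String Int × PySem.Dict String Int) item =>
        (pvDistanceFields.foldl
          (fun dd t => dd.insert t.1 (max (dd.getD t.1 0) (pvGradeScore ((PySem.Dict.mk item).get? t.2.2)))) st.1,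
         pvStyleFields.foldl
          (fun ss t => ss.insert t.1 (max (ss.getD t.1 0) (pvGradeScore ((PySem.Dict.mk item).get? t.2.2)))) st.2))
      (PySem.Dict.mk [("short", a), ("mile", b), ("middle", c), ("long", d)],
       PySem.Dict.mk [("runner", e), ("leader", f), ("betweener", g), ("chaser", h)])
    = (PySem.Dict.mk
        [("short", l.foldl (fun x it => max x (pvG it "aptitudeShort")) a),
         ("mile", l.foldl (fun x it => max x (pvG it "aptitudeMile")) b),
         ("middle", l.foldl (fun x it => max x (pvG it "aptitudeMiddle")) c),
         ("long", l.foldl (fun x it => max x (pvG it "aptitudeLong")) d)],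
       PySem.Dict.mk
        [("runner", l.foldl (fun x it => max x (pvG it "aptitudeRunner")) e),
         ("leader", l.foldl (fun x it => max x (pvG it "aptitudeLeader")) f),
         ("betweener", l.foldl (fun x it => max x (pvG it "aptitudeBetweener")) g),
         ("chaser", l.foldl (fun x it => max x (pvG it "aptitudeChaser")) h)]) := by
  induction l with
  | nil => intro a b c d e f g h; rfl
  | cons item l ih =>
      intro a b c d e f g h
      simp only [List.foldl_cons]
      rw [pv_stepD, pv_stepS, ih]

-- ===== VERDICT (by name: the statement is the Claim_ definition above) =====
theorem build_best_aptitudes_spec : Claim_equal_build_best_aptitudes := by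
  intro raw _
  unfold Spec_build_best_aptitudes build_best_aptitudes build_best_aptitudes_alt
  rw [show (pvDistanceFields.foldl (fun d t => d.insert t.1 0) (PySem.Dict.mk ([] : List (String × Int))))
      = PySem.Dict.mk [("short", 0), ("mile", 0), ("middle", 0), ("long", 0)] from rfl,
     show (pvStyleFields.foldl (fun d t => d.insert t.1 0) (PySem.Dict.mk ([] : List (String × Int))))
      = PySem.Dict.mk [("runner", 0), ("leader", 0), ("betweener", 0), ("chaser", 0)] from rfl]
  dsimp only
  rw [pv_foldA raw 0 0 0 0 0 0 0 0]
  simp only [pvDistanceFields, pvStyleFields, List.map_cons, List.map_nil]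
  simp only [pv_best_eq]
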